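/- GENERATED by mk_final_copies.py from the proof of the farm's unit `compute_codewords.3` (farm:compute_codewords.3.1: Proof.lean) as the
   re-elaboration sweep compiled it — do not edit. -/
import Asan.CheckWalk
import Vorbis.Spec.Units.compute_codewords_3

/- Segment 3 of compute_codewords (0x108257 – 0x108277, 8 instructions, one check site, one contract call; line 1133:
   `add_entry(c, 0, k, m++, len[k], values)` for the first used entry `k`): from the assertion `AtFirst k` at the check of `len[k]` to
   `At3 k` after add_entry's return. -/
open X86 X86.User Asan Vorbis Vorbis.Spec
open Vorbis.Spec.compute_codewords

set_option maxRecDepth 4000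
set_option maxHeartbeats 4000000

theorem Vorbis.Spec.Worked.compute_codewords_3_ok : Vorbis.Spec.compute_codewords_3.Statement := by
  intro Lay hLay μ hμ u₀ hcode hload1 hadd others frames Blk u ret k v hat
  -- the entry state's facts, from the assertion
  have he := hat.entry
  v_entry he
  have hpre := hat.pre
  have hsh := hpre.shadow
  have hsp := hsh.rsp
  have hn24 := cw_n_lt hpre
  have hinvB := cw_inv_pushed hsh he_align he_room he_top
  have hLive := cw_blkLive_pushed ((u.reg .rsp).toNat - 248) Vorbis.Frames.compute_codewords hpre.live
  have hklt := hat.k_lt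
  have hw : Vorbis.L.textHi ≤ (u.reg .rsi).toNat ∧ (u.reg .rsi).toNat + (u.reg .rdx).toNat % 2 ^ 32 ≤ 0xC00000 ∧
      ((u.reg .rsp).toNat + 8 ≤ (u.reg .rsi).toNat ∨ (u.reg .rsi).toNat + (u.reg .rdx).toNat % 2 ^ 32 ≤ 0x700000 ∨
        0x800000 ≤ (u.reg .rsi).toNat) :=
    blk_where hpre.live hsh.inv hsh.offText (by omega) hpre.lens (by show 1 ≤ (u.reg .rdx).toNat % 2 ^ 32; omega)
  have hbw := cw_book_where hpre he_room
  have w_rip := hat.rip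
  have w_r13 := hat.r13
  have w_r14 := hat.r14
  have w_r15 := hat.r15
  have w_rdi := hat.rdi
  have hbK := hat.body
  obtain ⟨w_rsp, w_eq, hdf, hmx, hsame, hbody, hs0, hs1, hs2, hs3, hs4, hs5, hs6, hsLen, hsC, hsVal, hsN⟩ := hat.body
  have w_sse : SseOK v := ⟨hmx⟩
  have w_kept := cw_kept_all u v
  unfold cw_allRegs at w_kept
  have haddr := cw_idx_addr k (u.reg .rsi) (by omega) (by omega)
  have hsameW := cw_same_nil_windows (cwWindows u) hsame
  -- the byte `len[k]` reads as at the entry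
  have hbyte : v.mem.readLE (Word.ofBV (BitVec.signExtend 64 (BitVec.ofNat 32 k)) + u.reg .rsi) 1 =
      u.mem.u8 ((u.reg .rsi).toNat + k) :=
    cw_len_kept hpre he_room he_top hsameW hklt _ haddr
  have hfld := cw_fields_kept hpre he_room he_top hsameW
  have hadd' := hadd others (((u.reg .rsp).toNat - 248, Vorbis.Frames.compute_codewords) :: frames)
  u_walk hcode [hμ.vendor] until [Vorbis.L.compute_codewords.cut3] span [Vorbis.L.textLo, Vorbis.L.textHi] side (v_side)
  · -- check_108257: `len[k]`, `k < n`, lies in the block `len`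
    have hun : ShadowUntouched (cw_poisonedMem u) s_108257.mem := by
      rw [w_mem]
      exact Mem.EqOn.trans hbody (Mem.EqOn.writeLE _ _ _ _ _ _ (by u_omega) (by u_omega))
    refine check_site (a := (u.reg .rsi).toNat + k) hinvB hun (Site.of_blk hLive hpre.lens ?_ ?_ (Nat.le_refl 1)) haddr
    · show (u.reg .rsi).toNat ≤ (u.reg .rsi).toNat + k
      omega
    · show (u.reg .rsi).toNat + k + 1 ≤ (u.reg .rsi).toNat + (u.reg .rdx).toNat % 2 ^ 32
      omega
  · -- call_inv
    v_inv
  · -- pre_108277: the precondition of add_entry (`m = 0 = usedCount … k`)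
    have hun : ShadowUntouched (cw_poisonedMem u) s_108277.mem := by
      rw [w_mem]
      exact Mem.EqOn.trans hbody (Mem.EqOn.writeLE _ _ _ _ _ _ (by u_omega) (by u_omega))
    have hsT : Mem.SameExcept (⟨(u.reg .rsp).toNat - 400, (u.reg .rsp).toNat⟩ ::
        ⟨0xC00000 + ((u.reg .rsp).toNat - 248) / 8, 0xC00000 + ((u.reg .rsp).toNat - 248) / 8 + 24⟩ :: cwWindows u)
        u.mem s_108277.mem := by
      rw [w_mem]
      refine hsameW.step_writeLE _ _ _ (by u_omega) ⟨_, List.mem_cons_self, ?_, ?_⟩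
      · show (u.reg .rsp).toNat - 400 ≤ (u.reg .rsp - 304).toNat
        u_omega
      · show (u.reg .rsp - 304).toNat + 8 ≤ (u.reg .rsp).toNat
        u_omega
    have h0 : usedCount u.mem (u.reg .rsi).toNat k = 0 := by
      apply countBelow_eq_zero
      intro j hj
      unfold usedP
      exact decide_eq_false (fun hne => hne (hat.unused j hj))
    refine cw_add_entry_pre hpre he_align he_room he_top hsT hun w_rsp w_rdi w_r9 w_rdx ?_
      hklt hat.used
    rw [h0]
    exact w_rcx
  · -- after add_entry's return (0x10827c = cut3): the assertion `At3 k`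
    obtain ⟨hun_ae, hpost_d, hpost_s⟩ := w_post
    have w_eq := Vorbis.conv_code_eqOn w_code
    have hi : X86.User.abiInv s_108277r := w_inv
    have hunT : ShadowUntouched (cw_poisonedMem u) s_108277.mem := by
      rw [w_mem_108277]
      exact Mem.EqOn.trans hbody (Mem.EqOn.writeLE _ _ _ _ _ _ (by u_omega) (by u_omega))
    have hsT : Mem.SameExcept (⟨(u.reg .rsp).toNat - 400, (u.reg .rsp).toNat⟩ ::
        ⟨0xC00000 + ((u.reg .rsp).toNat - 248) / 8, 0xC00000 + ((u.reg .rsp).toNat - 248) / 8 + 24⟩ :: cwWindows u)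
        u.mem s_108277.mem := by
      rw [w_mem_108277]
      refine hsameW.step_writeLE _ _ _ (by u_omega) ⟨_, List.mem_cons_self, ?_, ?_⟩
      · show (u.reg .rsp).toNat - 400 ≤ (u.reg .rsp - 304).toNat
        u_omega
      · show (u.reg .rsp - 304).toNat + 8 ≤ (u.reg .rsp).toNat
        u_omega
    have h0 : usedCount u.mem (u.reg .rsi).toNat k = 0 := by
      apply countBelow_eq_zero
      intro j hj
      unfold usedP
      exact decide_eq_false (fun hne => hne (hat.unused j hj))
    have hrcx : s_108277.reg .rcx = Word.ofBV (BitVec.ofNat 32 (usedCount u.mem (u.reg .rsi).toNat k)) := by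
      rw [h0]
      exact w_rcx_108277
    have e304 : (s_108277.reg .rsp).toNat = (u.reg .rsp).toNat - 304 := by
      rw [w_rsp_108277]
      u_omega
    have hsub := cw_writes_sub
      (fr := ((u.reg .rsp).toNat - 248, Vorbis.Frames.compute_codewords) :: frames) hpre he_room he_top hsT
      w_rdi_108277 w_r9_108277 w_rdx_108277 hrcx hklt hat.used
    have hwin := cw_windows_where hpre he_room (by omega)
      (fun hs => by
        have hlt := cw_used_lt hpre hs hklt hat.used
        omega)
    -- the footprint after the call: add_entry's frame is inside the stack window, its cells inside `cwWindows u`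
    have hsR : Mem.SameExcept (⟨(u.reg .rsp).toNat - 400, (u.reg .rsp).toNat⟩ ::
        ⟨0xC00000 + ((u.reg .rsp).toNat - 248) / 8, 0xC00000 + ((u.reg .rsp).toNat - 248) / 8 + 24⟩ :: cwWindows u)
        u.mem s_108277r.mem := by
      refine hsT.step_same w_same ?_
      intro w hw a h1 h2
      simp only [X86.User.Spec.footprint, add_entry.spec_frame] at hw
      rcases List.mem_cons.mp hw with e | hw'
      · rw [e] at h1 h2
        refine ⟨_, List.mem_cons_self, ?_, ?_⟩
        · show (u.reg .rsp).toNat - 400 ≤ a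
          have h1' : (s_108277.reg .rsp).toNat - 96 ≤ a := h1
          omega
        · show a < (u.reg .rsp).toNat
          have h2' : a < (s_108277.reg .rsp).toNat := h2
          omega
      · obtain ⟨w', hw'm, h3, h4⟩ := hsub w hw'
        exact ⟨w', List.mem_cons_of_mem _ (List.mem_cons_of_mem _ hw'm), by omega, by omega⟩
    -- the live part of the stack is as in `v`
    have hE : Mem.EqOn ((u.reg .rsp).toNat - 296) ((u.reg .rsp).toNat + 8) v.mem s_108277r.mem := by
      have hE1 : Mem.EqOn ((u.reg .rsp).toNat - 296) ((u.reg .rsp).toNat + 8) v.mem s_108277.mem := by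
        rw [w_mem_108277]
        exact Mem.EqOn.writeLE _ _ _ _ _ _ (by u_omega) (by u_omega)
      refine hE1.trans (w_same.eqOn _ _ ?_)
      intro w hw
      simp only [X86.User.Spec.footprint, add_entry.spec_frame] at hw
      rcases List.mem_cons.mp hw with e | hw'
      · rw [e]
        right
        show (s_108277.reg .rsp).toNat ≤ (u.reg .rsp).toNat - 296
        omega
      · obtain ⟨w', hw'm, h3, h4⟩ := hsub w hw'
        have hwh := hwin w' hw'm
        omega
    refine ReachVia.done ?_
    refine { entry := hat.entry, pre := hpre,
             body := hbK.carry hE he_room he_top w_rsp w_eq hi.1 hi.2 hsR (Mem.EqOn.trans hunT hun_ae),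
             rip := w_rip, r13 := w_r13, r14 := w_r14, r15 := w_r15, k_lt := hklt, used := hat.used,
             cnt := cw_used_first hat.unused hat.used, val := ?_ }
    -- sparse: `values[0] = k < n`
    intro hs
    have hst : Codebook.sparse s_108277.mem (s_108277.reg .rdi).toNat ≠ 0 := by
      rw [w_rdi_108277, (cw_fields_kept hpre he_room he_top hsT).sparse]
      exact hs
    obtain ⟨_, _, hv⟩ := hpost_s hst
    have ebase : (add_entry.valCell s_108277).base = (u.reg .rcx).toNat + 4 * 0 := by
      show (s_108277.reg .r9).toNat + 4 * ((s_108277.reg .rcx).toNat % 2 ^ 32) = _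
      rw [w_r9_108277, w_rcx_108277]
      rfl
    have ek : argU32 (s_108277.reg .rdx) = k := by
      show (s_108277.reg .rdx).toNat % 2 ^ 32 = k
      rw [w_rdx_108277, cw_cnt_toNat k (by omega)]
      omega
    rw [ebase, ek] at hv
    have hlt64 : (u.reg .rcx).toNat < 2 ^ 64 := UInt64.toNat_lt _
    refine VAL.store (VAL.zero s_108277.mem _ _) ?_ (by omega) ?_
    · intro a h1 h2
      omega
    · rw [hv]
      exact hklt
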